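-- pv_equiv track=rewrite | github.com/anguelos/torch_mentor | mentor/mentee.py | _remove_target_from_frozen
-- ===== SOURCE A (Python) =====
-- from typing import Any, Dict, List, Optional, Tuple, Type, Union
--
-- def _immediate_children(parent: str, layer_names: List[str]) -> List[str]:
--     """Return the shallowest descendants of *parent* in *layer_names*.
--
--     *layer_names* must be in ``named_modules()`` pre-order (parent before
--     children).  For example, if *parent* is ``"iunet"`` and *layer_names*
--     contains ``["iunet.downsampling_layers", "iunet.downsampling_layers.0",
--     "iunet.upsampling_layers"]``, the result is
--     ``["iunet.downsampling_layers", "iunet.upsampling_layers"]``.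
--     """
--     prefix = parent + "."
--     result: List[str] = []
--     for name in layer_names:
--         if not name.startswith(prefix):
--             continue
--         # skip deeper descendants already covered by the last added child
--         if result and name.startswith(result[-1] + "."):
--             continue
--         result.append(name)
--     return result
--
-- def _remove_target_from_frozen(
--     frozen: set,
--     target: str,
--     layer_names: List[str],
-- ) -> set:
--     """Return a new frozen set with *target* removed, expanding ancestor rules.
--
--     Handles three cases:
--
--     * ``target in frozen`` — direct discard.
--     * An ancestor rule covers *target* (e.g. ``frozen = {"iunet"}`` and
--       ``target = "iunet.downsampling_layers"``) — the ancestor is replaced by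
--       sibling rules so the rest of the subtree stays frozen.
--     * *target* is an ancestor of one or more frozen child entries (e.g.
--       ``frozen = {"iunet.downsampling_layers", "iunet.upsampling_layers"}``
--       and ``target = "iunet"``) — all child entries are removed so the whole
--       subtree becomes trainable.
--     """
--     frozen = set(frozen)
--
--     # Remove exact entry and any child entries covered by target
--     frozen.discard(target)
--     frozen = {m for m in frozen if not m.startswith(target + ".")}
--
--     # Handle ancestor expansion: find deepest ancestor in frozen covering target
--     ancestors = sorted(
--         [m for m in frozen if target.startswith(m + ".")], key=len
--     )
--     if not ancestors:
--         return frozen  # nothing left to expand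
--
--     ancestor = ancestors[-1]  # deepest covering rule
--     frozen.discard(ancestor)
--
--     children = _immediate_children(ancestor, layer_names)
--     for child in children:
--         if child == target:
--             pass  # this is exactly what we want unfrozen -- don't add back
--         elif target.startswith(child + "."):
--             # child is an intermediate ancestor; add it then recurse
--             frozen.add(child)
--             frozen = _remove_target_from_frozen(frozen, target, layer_names)
--         else:
--             frozen.add(child)  # sibling subtree -- keep frozen
--
--     return frozen
-- ===== SOURCE B (Python) =====
-- from typing import List
--
--
-- def _immediate_children(parent: str, layer_names: List[str]) -> List[str]:
--     prefix = parent + "."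
--     result: List[str] = []
--     for name in layer_names:
--         if not name.startswith(prefix):
--             continue
--         if result and name.startswith(result[-1] + "."):
--             continue
--         result.append(name)
--     return result
--
--
-- def _remove_target_from_frozen(
--     frozen: set,
--     target: str,
--     layer_names: List[str],
-- ) -> set:
--     # Cleanup: drop target itself and everything below it.
--     base = [m for m in set(frozen) if m != target and not m.startswith(target + ".")]
--     # Deepest frozen ancestor covering target (unique: same-length ancestors coincide).
--     anc = None
--     for m in base:
--         if target.startswith(m + ".") and (anc is None or len(m) > len(anc)):
--             anc = m
--     if anc is None:
--         return set(base)
--     base.remove(anc)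
--     # Iterative walk from the ancestor down towards target, collecting the
--     # sibling subtrees that must stay frozen at each level.
--     before: List[str] = []
--     after: List[str] = []
--     cur = anc
--     while cur is not None:
--         nxt = None
--         post: List[str] = []
--         for child in _immediate_children(cur, layer_names):
--             if child == target:
--                 continue
--             if nxt is None and target.startswith(child + "."):
--                 nxt = child
--             elif nxt is None:
--                 before.append(child)
--             else:
--                 post.append(child)
--         after = post + after
--         cur = nxt
--     result: List[str] = []
--     for m in base + before + after:
--         if m not in result:
--             result.append(m)
--     return set(result)
-- ===== Notes on version B (the rewrite author's own statement) =====
-- stated objective: alternative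
-- what changed: Replaces A's recursive ancestor expansion (which re-cleans the frozen set and re-searches the deepest covering ancestor at every recursion level) by one cleanup pass, one linear deepest-ancestor scan, and a single iterative walk down the ancestor chain with two sibling accumulators.
-- outside the precondition, e.g. on _remove_target_from_frozen({'a', 'c'}, 'c.c.c.c', ['c.c', 'c.c', 'a']): A returns {'a'}, B returns {'c.c', 'a'}
import Mathlib
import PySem

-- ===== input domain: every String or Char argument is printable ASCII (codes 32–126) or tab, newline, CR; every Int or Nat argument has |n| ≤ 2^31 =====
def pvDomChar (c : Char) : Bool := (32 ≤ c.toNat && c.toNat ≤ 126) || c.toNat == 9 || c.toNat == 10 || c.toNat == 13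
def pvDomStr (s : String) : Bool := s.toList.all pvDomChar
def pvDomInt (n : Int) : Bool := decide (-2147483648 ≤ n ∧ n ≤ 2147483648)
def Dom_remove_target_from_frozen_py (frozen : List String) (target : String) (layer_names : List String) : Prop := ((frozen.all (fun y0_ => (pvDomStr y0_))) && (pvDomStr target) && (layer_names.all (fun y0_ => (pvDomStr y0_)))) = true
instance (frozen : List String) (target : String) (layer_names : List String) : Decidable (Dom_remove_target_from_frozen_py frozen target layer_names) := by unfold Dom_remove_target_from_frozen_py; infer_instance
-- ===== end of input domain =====

-- Header: B replaces A's recursive ancestor re-expansion (re-cleaning the frozen set and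
-- re-searching the deepest ancestor at every level) by a single cleanup, a single deepest-ancestor
-- scan and one iterative walk down the ancestor chain with two sibling accumulators (objective:
-- alternative decomposition).  Equivalence is proved for layer_names in named_modules() pre-order
-- (see Pre_); returned-value equivalence only (the Pythons return fresh sets, no mutation).

-- ===== PORT A =====

-- m.startswith(parent + ".")   ("m is a strict descendant of parent")
def pvDsw (m parent : String) : Bool := PySem.Str.startswith m (parent ++ ".")

-- "result and name.startswith(result[-1] + '.')"
def pvCovCheck (result : List String) (name : String) : Bool :=
  match result.getLast? with
  | some last => pvDsw name last
  | none => false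

-- literal port of _immediate_children
def immediate_children_py (parent : String) (layer_names : List String) : List String :=
  layer_names.foldl
    (fun result name =>
      if !(pvDsw name parent) then result
      else if pvCovCheck result name then result
      else result ++ [name])
    []

-- fuel-guarded literal port of the recursion of _remove_target_from_frozen (A).
-- The fuel only makes the recursion structural: the chain of expanded ancestors has strictly
-- increasing lengths < |target|, so (|target| + 1) fuel is never exhausted.
def pvRemoveA (target : String) (names : List String) : Nat → List String → List String
  | 0, frozen => frozen
  | fuel+1, frozen =>
    let frozen1 := PySem.Set.discard frozen target
    let frozen2 := frozen1.filter (fun m => !(pvDsw m target))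
    let ancestors := PySem.List.sorted (frozen2.filter (fun m => pvDsw target m))
      (fun m => PySem.Str.len m) false
    match ancestors.getLast? with
    | none => frozen2
    | some ancestor =>
      let frozen3 := PySem.Set.discard frozen2 ancestor
      (immediate_children_py ancestor names).foldl
        (fun fr child =>
          if child = target then fr
          else if pvDsw target child then pvRemoveA target names fuel (PySem.Set.add fr child)
          else PySem.Set.add fr child)
        frozen3

def remove_target_from_frozen_py (frozen : List String) (target : String) (layer_names : List String) : List String :=
  pvRemoveA target layer_names (target.toList.length + 1) (PySem.Set.ofList frozen)

-- ===== PORT B =====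

-- linear scan for the deepest frozen ancestor covering target
def pvAncStep (target : String) (anc : Option String) (m : String) : Option String :=
  if pvDsw target m && (match anc with
                        | none => true
                        | some a => decide (PySem.Str.len a < PySem.Str.len m)) then some m
  else anc

def pvFindAnc (target : String) (base : List String) : Option String :=
  base.foldl (pvAncStep target) none

-- one level of the walk: split the children of cur into the next step on the path to target
-- and the sibling subtrees collected before / after it
def pvStepB (target : String) (st : Option String × List String × List String) (child : String) :
    Option String × List String × List String :=
  if child = target then st
  else match st with
  | (none, bef, post) =>
    if pvDsw target child then (some child, bef, post) else (none, bef ++ [child], post)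
  | (some nxt, bef, post) => (some nxt, bef, post ++ [child])

-- fuel-guarded port of B's while-loop (cur strictly deepens below target, so fuel suffices)
def pvLoopB (target : String) (names : List String) :
    Nat → String → List String → List String → List String × List String
  | 0, _, before, after => (before, after)
  | fuel+1, cur, before, after =>
    match (immediate_children_py cur names).foldl (pvStepB target) (none, before, []) with
    | (none, bef, post) => (bef, post ++ after)
    | (some nxt, bef, post) => pvLoopB target names fuel nxt bef (post ++ after)

def remove_target_from_frozen_py_alt (frozen : List String) (target : String) (layer_names : List String) : List String :=
  let base := (PySem.Set.ofList frozen).filter (fun m => !(m == target) && !(pvDsw m target))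
  match pvFindAnc target base with
  | none => PySem.Set.ofList base
  | some anc =>
    let base2 := base.erase anc
    let ba := pvLoopB target layer_names (target.toList.length + 1) anc [] []
    PySem.Set.ofList (base2 ++ ba.1 ++ ba.2)

-- ===== PRECONDITION & SPEC =====

def pvPairB (p : String → String → Bool) : List String → Bool
  | [] => true
  | x :: rest => rest.all (p x) && pvPairB p rest

def pvContigB : List String → Bool
  | [] => true
  | x :: rest => pvPairB (fun y z => !(pvDsw z x) || pvDsw y x) rest && pvContigB rest

-- Pre_ restricts layer_names to a duplicate-free pre-order module listing (no name preceded by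
-- one of its descendants, and every subtree listed contiguously) — the documented
-- named_modules() contract of this helper; outside it A's repeated recursive re-expansion and
-- B's single walk can return different sets, an accident of A's implementation order.
def Pre_remove_target_from_frozen_py (frozen : List String) (target : String) (layer_names : List String) : Prop :=
  layer_names.Nodup
  ∧ pvPairB (fun x y => !(pvDsw x y)) layer_names = true
  ∧ pvContigB layer_names = true

instance (frozen : List String) (target : String) (layer_names : List String) : Decidable (Pre_remove_target_from_frozen_py frozen target layer_names) := by unfold Pre_remove_target_from_frozen_py; infer_instance

def pvWitness_remove_target_from_frozen_py : List String × String × List String :=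
  (["iunet", "head"], "iunet.down.0",
   ["iunet", "iunet.down", "iunet.down.0", "iunet.down.1", "iunet.up", "head"])

def Spec_remove_target_from_frozen_py (frozen : List String) (target : String) (layer_names : List String) (out : List String) : Prop := out = remove_target_from_frozen_py_alt frozen target layer_names
instance (frozen : List String) (target : String) (layer_names : List String) (out : List String) : Decidable (Spec_remove_target_from_frozen_py frozen target layer_names out) := by unfold Spec_remove_target_from_frozen_py; infer_instance

-- ===== CLAIM (what is proved, stated in full; the proofs are below) =====
def Claim_equal_remove_target_from_frozen_py : Prop := ∀ (frozen : List String) (target : String) (layer_names : List String), Dom_remove_target_from_frozen_py frozen target layer_names → Pre_remove_target_from_frozen_py frozen target layer_names → Spec_remove_target_from_frozen_py frozen target layer_names (remove_target_from_frozen_py frozen target layer_names)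

-- ===== LEMMAS AND PROOFS =====

theorem pvWitness_ok :
    Dom_remove_target_from_frozen_py pvWitness_remove_target_from_frozen_py.1
      pvWitness_remove_target_from_frozen_py.2.1 pvWitness_remove_target_from_frozen_py.2.2
    ∧ Pre_remove_target_from_frozen_py pvWitness_remove_target_from_frozen_py.1
      pvWitness_remove_target_from_frozen_py.2.1 pvWitness_remove_target_from_frozen_py.2.2 := by
  decide

-- ---- basic facts about pvDsw ----

theorem pvDsw_iff (x y : String) : pvDsw x y = true ↔ y.toList ++ ['.'] <+: x.toList := by
  have h : (y ++ ".").toList = y.toList ++ ['.'] := by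
    rw [String.toList_append]; rfl
  simp [pvDsw, PySem.Str.startswith, PySem.Chars.startswith_iff, h]

theorem pvDsw_length {x y : String} (h : pvDsw x y = true) :
    y.toList.length + 1 ≤ x.toList.length := by
  have := ((pvDsw_iff x y).1 h).length_le
  simpa using this

theorem pvDsw_irrefl (x : String) : pvDsw x x = false := by
  cases hx : pvDsw x x
  · rfl
  · have := pvDsw_length hx; omega

theorem pvDsw_antisymm {x y : String} (h1 : pvDsw x y = true) (h2 : pvDsw y x = true) : False := by
  have := pvDsw_length h1; have := pvDsw_length h2; omega

theorem pvDsw_trans {x t c : String} (h1 : pvDsw x t = true) (h2 : pvDsw t c = true) :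
    pvDsw x c = true := by
  rw [pvDsw_iff] at *
  exact h2.trans ((List.prefix_append _ _).trans h1)

theorem pv_prefix_snoc {l₁ l₂ : List Char} {x : Char}
    (h : l₁ <+: l₂ ++ [x]) (hl : l₁.length ≤ l₂.length) : l₁ <+: l₂ := by
  have h1 : l₁ = (l₂ ++ [x]).take l₁.length := List.prefix_iff_eq_take.1 h
  have h2 : (l₂ ++ [x]).take l₁.length = l₂.take l₁.length :=
    List.take_append_of_le_length hl
  rw [h1, h2]
  exact List.take_prefix _ _

theorem pvDsw_compare {t a b : String} (ha : pvDsw t a = true) (hb : pvDsw t b = true)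
    (hlen : a.toList.length ≤ b.toList.length) : a = b ∨ pvDsw b a = true := by
  have pa := (pvDsw_iff t a).1 ha
  have pb := (pvDsw_iff t b).1 hb
  rcases lt_or_eq_of_le hlen with hlt | heq
  · right
    rcases List.prefix_or_prefix_of_prefix pa pb with hp | hp
    · rw [pvDsw_iff]
      exact pv_prefix_snoc hp (by simpa using hlt)
    · exfalso
      have := hp.length_le
      simp only [List.length_append, List.length_cons, List.length_nil] at this
      omega
  · left
    rcases List.prefix_or_prefix_of_prefix pa pb with hp | hp
    · have : a.toList ++ ['.'] = b.toList ++ ['.'] := hp.eq_of_length (by simp [heq])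
      have : a.toList = b.toList := by simpa using this
      exact String.toList_inj.1 this
    · have : b.toList ++ ['.'] = a.toList ++ ['.'] := hp.eq_of_length (by simp [heq])
      have : b.toList = a.toList := by simpa using this
      exact (String.toList_inj.1 this).symm

theorem pvAnc_unique {t a b : String} (ha : pvDsw t a = true) (hb : pvDsw t b = true)
    (hlen : a.toList.length = b.toList.length) : a = b := by
  rcases pvDsw_compare ha hb (le_of_eq hlen) with h | h
  · exact h
  · exact absurd (pvDsw_length h) (by omega)

theorem pvStrLen_eq (m : String) : PySem.Str.len m = (m.toList.length : Int) := by
  simp [PySem.Str.len_eq, PySem.Chars.len_eq]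

-- ---- Pairwise bridge ----

theorem pvPairB_iff (p : String → String → Bool) (l : List String) :
    pvPairB p l = true ↔ l.Pairwise (fun x y => p x y = true) := by
  induction l with
  | nil => simp [pvPairB]
  | cons x rest ih =>
    simp [pvPairB, List.all_eq_true, List.pairwise_cons, ih, and_comm]

-- ---- the sanitised frozen set (used only by the proofs) ----

def pvClean (target : String) (S : List String) : List String :=
  (PySem.Set.discard S target).filter (fun m => !(pvDsw m target))

theorem pvClean_eq (target : String) (S : List String) :
    pvClean target S = S.filter (fun m => !(m == target) && !(pvDsw m target)) := by
  simp only [pvClean, PySem.Set.discard, List.filter_filter]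
  exact List.filter_congr (fun m _ => by
    cases h1 : pvDsw m target <;> cases h2 : (m == target) <;> simp [h1, h2])

theorem pvClean_mem {target : String} {S : List String} {m : String}
    (h : m ∈ pvClean target S) : m ∈ S ∧ m ≠ target ∧ pvDsw m target = false := by
  rw [pvClean_eq] at h
  simp only [List.mem_filter, Bool.and_eq_true, Bool.not_eq_true', beq_eq_false_iff_ne] at h
  exact ⟨h.1, h.2.1, h.2.2⟩

theorem pvClean_of_clean {target : String} {S : List String}
    (h : ∀ m ∈ S, m ≠ target ∧ pvDsw m target = false) : pvClean target S = S := by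
  rw [pvClean_eq]
  apply List.filter_eq_self.2
  intro m hm
  rcases h m hm with ⟨h1, h2⟩
  simp [h1, h2]

theorem pvClean_nodup {target : String} {S : List String} (h : S.Nodup) :
    (pvClean target S).Nodup := by
  rw [pvClean_eq]; exact h.filter _

-- ---- properties of immediate_children_py under the pre-order precondition ----

theorem pvCovCheck_of_getLast {res : List String} {n l : String}
    (h : res.getLast? = some l) : pvCovCheck res n = pvDsw n l := by
  simp [pvCovCheck, h]

theorem pvChildren_spec (cur : String) (names : List String)
    (hnd : names.Nodup)
    (hA : names.Pairwise (fun x y => pvDsw x y = false))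
    (hC : pvContigB names = true) :
    (immediate_children_py cur names).Nodup ∧
    (∀ x ∈ immediate_children_py cur names, pvDsw x cur = true) ∧
    (∀ x ∈ immediate_children_py cur names, ∀ y ∈ immediate_children_py cur names,
      x ≠ y → pvDsw x y = false) := by
  have key : ∀ (rest res : List String),
      res.Nodup →
      (∀ r ∈ res, pvDsw r cur = true) →
      (∀ a ∈ res, ∀ b ∈ res, a ≠ b → pvDsw a b = false) →
      (∀ m ∈ rest, m ∉ res) →
      (∀ m ∈ rest, ∀ r ∈ res, pvDsw r m = false) →
      (∀ m ∈ rest, ∀ r ∈ res, pvDsw m r = true → res.getLast? = some r) →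
      (∀ r ∈ res, rest.Pairwise (fun a b => pvDsw b r = true → pvDsw a r = true)) →
      rest.Nodup →
      rest.Pairwise (fun x y => pvDsw x y = false) →
      pvContigB rest = true →
      ((rest.foldl (fun result name =>
          if !(pvDsw name cur) then result
          else if pvCovCheck result name then result
          else result ++ [name]) res).Nodup ∧
       (∀ x ∈ rest.foldl (fun result name =>
          if !(pvDsw name cur) then result
          else if pvCovCheck result name then result
          else result ++ [name]) res, pvDsw x cur = true) ∧
       (∀ x ∈ rest.foldl (fun result name =>
          if !(pvDsw name cur) then result
          else if pvCovCheck result name then result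
          else result ++ [name]) res,
        ∀ y ∈ rest.foldl (fun result name =>
          if !(pvDsw name cur) then result
          else if pvCovCheck result name then result
          else result ++ [name]) res, x ≠ y → pvDsw x y = false)) := by
    intro rest
    induction rest with
    | nil => intro res h1 h2 h3 _ _ _ _ _ _ _; exact ⟨h1, h2, h3⟩
    | cons n rest' ih =>
      intro res h1 h2 h3 h4 h5 h6 h7 hnd' hA' hC'
      have hAhead : ∀ y ∈ rest', pvDsw n y = false := (List.pairwise_cons.1 hA').1
      have hAtail : rest'.Pairwise (fun x y => pvDsw x y = false) := (List.pairwise_cons.1 hA').2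
      have hCsplit : pvPairB (fun y z => !(pvDsw z n) || pvDsw y n) rest' = true
          ∧ pvContigB rest' = true := by
        rw [pvContigB, Bool.and_eq_true] at hC'
        exact hC'
      have hndtail : rest'.Nodup := hnd'.of_cons
      have hnmem : n ∉ rest' := (List.nodup_cons.1 hnd').1
      rw [List.foldl_cons]
      by_cases hdc : pvDsw n cur = true
      · have h1c : ¬((!pvDsw n cur) = true) := by rw [hdc]; simp
        by_cases hskip : pvCovCheck res n = true
        · rw [if_neg h1c, if_pos hskip]
          exact ih res h1 h2 h3 (fun m hm => h4 m (by simp [hm]))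
            (fun m hm => h5 m (by simp [hm])) (fun m hm => h6 m (by simp [hm]))
            (fun r hr => (List.pairwise_cons.1 (h7 r hr)).2) hndtail hAtail hCsplit.2
        · rw [if_neg h1c, if_neg hskip]
          have hn : n ∉ res := h4 n (by simp)
          refine ih (res ++ [n]) ?_ ?_ ?_ ?_ ?_ ?_ ?_ hndtail hAtail hCsplit.2
          · exact h1.append (List.nodup_singleton n)
              (fun a ha hb => hn ((List.mem_singleton.1 hb) ▸ ha))
          · intro r hr
            rcases List.mem_append.1 hr with hr | hr
            · exact h2 r hr
            · rw [show r = n from by simpa using hr]; exact hdc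
          · intro a ha b hb hne
            rcases List.mem_append.1 ha with ha | ha <;> rcases List.mem_append.1 hb with hb | hb
            · exact h3 a ha b hb hne
            · rw [show b = n from by simpa using hb]
              exact h5 n (by simp) a ha
            · rw [show a = n from by simpa using ha]
              cases hx : pvDsw n b
              · rfl
              · exfalso
                apply hskip
                rw [pvCovCheck_of_getLast (h6 n (by simp) b hb hx)]
                exact hx
            · exfalso
              rw [show a = n from by simpa using ha, show b = n from by simpa using hb] at hne
              exact hne rfl
          · intro m hm
            simp only [List.mem_append, List.mem_singleton]
            push_neg
            exact ⟨h4 m (by simp [hm]), fun h0 => hnmem (h0 ▸ hm)⟩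
          · intro m hm r hr
            rcases List.mem_append.1 hr with hr | hr
            · exact h5 m (by simp [hm]) r hr
            · rw [show r = n from by simpa using hr]
              exact hAhead m hm
          · intro m hm r hr hdr
            rcases List.mem_append.1 hr with hr | hr
            · exfalso
              have hnr : pvDsw n r = true :=
                (List.pairwise_cons.1 (h7 r hr)).1 m hm hdr
              apply hskip
              rw [pvCovCheck_of_getLast (h6 n (by simp) r hr hnr)]
              exact hnr
            · rw [show r = n from by simpa using hr]
              simp
          · intro r hr
            rcases List.mem_append.1 hr with hr | hr
            · exact (List.pairwise_cons.1 (h7 r hr)).2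
            · rw [show r = n from by simpa using hr]
              have := (pvPairB_iff _ _).1 hCsplit.1
              refine this.imp ?_
              intro a b hab hb
              rw [hb] at hab
              simpa using hab
      · have hdc' : pvDsw n cur = false := by revert hdc; cases pvDsw n cur <;> simp
        rw [if_pos (by rw [hdc']; simp : (!pvDsw n cur) = true)]
        exact ih res h1 h2 h3 (fun m hm => h4 m (by simp [hm]))
          (fun m hm => h5 m (by simp [hm])) (fun m hm => h6 m (by simp [hm]))
          (fun r hr => (List.pairwise_cons.1 (h7 r hr)).2) hndtail hAtail hCsplit.2
  exact key names [] (by simp) (by simp) (by simp) (by simp) (by simp) (by simp) (by simp)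
    hnd hA hC

-- ---- characterisation of pvFindAnc ----

theorem pvAncStep_none (target m : String) :
    pvAncStep target none m = if pvDsw target m = true then some m else none := by
  simp [pvAncStep]

theorem pvAncStep_some (target a m : String) :
    pvAncStep target (some a) m
      = if (pvDsw target m && decide (PySem.Str.len a < PySem.Str.len m)) = true
        then some m else some a := by
  simp [pvAncStep]

theorem pvFindAnc_none {target : String} {base : List String}
    (h : ∀ m ∈ base, pvDsw target m = false) : pvFindAnc target base = none := by
  unfold pvFindAnc
  induction base with
  | nil => rfl
  | cons m rest ih =>
    rw [List.foldl_cons, pvAncStep_none, if_neg (by simp [h m (by simp)])]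
    exact ih (fun x hx => h x (by simp [hx]))

theorem pvFindAnc_stay (target cur : String) :
    ∀ (l : List String), (∀ m ∈ l, pvDsw target m = true →
        m = cur ∨ m.toList.length < cur.toList.length) →
      l.foldl (pvAncStep target) (some cur) = some cur := by
  intro l
  induction l with
  | nil => intro _; rfl
  | cons m rest ih =>
    intro h
    have hcond : (pvDsw target m && decide (PySem.Str.len cur < PySem.Str.len m)) = false := by
      cases hm : pvDsw target m
      · simp
      · rw [Bool.true_and, decide_eq_false_iff_not, pvStrLen_eq, pvStrLen_eq]
        rcases h m (by simp) hm with h1 | h1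
        · subst h1; omega
        · push_cast; omega
    rw [List.foldl_cons, pvAncStep_some, if_neg (by intro hx; rw [hcond] at hx; cases hx)]
    exact ih (fun x hx => h x (by simp [hx]))

theorem pvFindAnc_some {target : String} {base : List String} {cur : String}
    (hnd : base.Nodup)
    (hmem : cur ∈ base) (hanc : pvDsw target cur = true)
    (hmax : ∀ m ∈ base, pvDsw target m = true →
      m = cur ∨ m.toList.length < cur.toList.length) :
    pvFindAnc target base = some cur := by
  unfold pvFindAnc
  suffices H : ∀ (l : List String) (acc : Option String),
      cur ∈ l →
      (∀ m ∈ l, pvDsw target m = true → m = cur ∨ m.toList.length < cur.toList.length) →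
      (acc = none ∨ ∃ a, acc = some a ∧ pvDsw target a = true ∧ a.toList.length < cur.toList.length) →
      l.foldl (pvAncStep target) acc = some cur by
    exact H base none hmem hmax (Or.inl rfl)
  intro l
  induction l with
  | nil => intro acc hc; simp at hc
  | cons m rest ih =>
    intro acc hcur h hacc
    have hrest : ∀ x ∈ rest, pvDsw target x = true → x = cur ∨ x.toList.length < cur.toList.length :=
      fun x hx => h x (by simp [hx])
    rw [List.foldl_cons]
    by_cases hm : m = cur
    · subst hm
      have hstep : pvAncStep target acc m = some m := by
        rcases hacc with h0 | ⟨a, ha, hda, hlen⟩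
        · subst h0; rw [pvAncStep_none, if_pos hanc]
        · subst ha
          rw [pvAncStep_some, if_pos]
          rw [hanc, Bool.true_and, decide_eq_true_eq, pvStrLen_eq, pvStrLen_eq]
          push_cast; omega
      rw [hstep]
      exact pvFindAnc_stay target m rest hrest
    · have hcr : cur ∈ rest := by
        rcases List.mem_cons.1 hcur with h0 | h0
        · exact absurd h0.symm hm
        · exact h0
      have hstep : pvAncStep target acc m = acc ∨
          (pvAncStep target acc m = some m ∧ pvDsw target m = true) := by
        rcases hacc with h0 | ⟨a, ha, hda, hlen⟩
        · subst h0
          rw [pvAncStep_none]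
          by_cases hd : pvDsw target m = true
          · exact Or.inr ⟨by rw [if_pos hd], hd⟩
          · exact Or.inl (by rw [if_neg hd])
        · subst ha
          rw [pvAncStep_some]
          by_cases hd : (pvDsw target m && decide (PySem.Str.len a < PySem.Str.len m)) = true
          · exact Or.inr ⟨by rw [if_pos hd], (by rw [Bool.and_eq_true] at hd; exact hd.1)⟩
          · exact Or.inl (by rw [if_neg hd])
      rcases hstep with ⟨h0⟩ | ⟨h0, hd⟩
      · rw [h0]; exact ih acc hcr hrest hacc
      · rw [h0]
        refine ih _ hcr hrest (Or.inr ⟨m, rfl, hd, ?_⟩)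
        rcases h m (by simp) hd with h1 | h1
        · exact absurd h1 hm
        · exact h1

-- ---- sorted: the last element is the deepest ancestor ----

theorem pvSorted_getLast {l : List String} {cur : String}
    (hmem : cur ∈ l)
    (hmax : ∀ m ∈ l, m = cur ∨ m.toList.length < cur.toList.length) :
    (PySem.List.sorted l (fun m => PySem.Str.len m) false).getLast? = some cur := by
  rcases List.eq_nil_or_concat (PySem.List.sorted l (fun m => PySem.Str.len m) false)
    with h0 | ⟨s', z, h0⟩
  · exfalso
    have hl0 : l = [] := (PySem.List.sorted_eq_nil_iff l (fun m => PySem.Str.len m) false).1 h0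
    rw [hl0] at hmem
    simp at hmem
  · have hz : z ∈ l := by
      have : z ∈ PySem.List.sorted l (fun m => PySem.Str.len m) false := by
        rw [h0, List.concat_eq_append]; simp
      exact (PySem.List.sorted_perm l (fun m => PySem.Str.len m) false).subset this
    have hpw := PySem.List.sorted_pairwise l (fun m => PySem.Str.len m)
    have hcurs : cur ∈ PySem.List.sorted l (fun m => PySem.Str.len m) false :=
      ((PySem.List.sorted_perm l (fun m => PySem.Str.len m) false).mem_iff).2 hmem
    rw [h0, List.concat_eq_append] at hcurs hpw ⊢
    rcases List.mem_append.1 hcurs with hc | hc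
    · have hle : PySem.Str.len cur ≤ PySem.Str.len z :=
        (List.pairwise_append.1 hpw).2.2 cur hc z (by simp)
      rcases hmax z hz with h1 | h1
      · subst h1; simp
      · exfalso
        rw [pvStrLen_eq, pvStrLen_eq] at hle
        push_cast at hle
        omega
    · have : cur = z := by simpa using hc
      subst this
      simp

-- ---- fold shapes ----

theorem pvFoldA_clean (target : String) (names : List String) (fuel : Nat) :
    ∀ (l : List String) (fr : List String), (∀ x ∈ l, pvDsw target x = false) →
      l.foldl (fun fr child =>
          if child = target then fr
          else if pvDsw target child then pvRemoveA target names fuel (PySem.Set.add fr child)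
          else PySem.Set.add fr child) fr
        = PySem.Set.update fr (l.filter (fun x => x ≠ target)) := by
  intro l
  induction l with
  | nil => intro fr _; rfl
  | cons x rest ih =>
    intro fr h
    rw [List.foldl_cons, List.filter_cons]
    by_cases hx : x = target
    · rw [if_pos hx]
      simp only [ne_eq, hx, not_true_eq_false, decide_false, if_false]
      exact ih fr (fun y hy => h y (by simp [hy]))
    · rw [if_neg hx, if_neg (by rw [h x (by simp)]; simp)]
      simp only [ne_eq, hx, not_false_eq_true, decide_true, if_true]
      rw [PySem.Set.update_cons]
      exact ih (PySem.Set.add fr x) (fun y hy => h y (by simp [hy]))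

theorem pvFoldB_none (target : String) :
    ∀ (l : List String) (bef p0 : List String), (∀ x ∈ l, pvDsw target x = false) →
      l.foldl (pvStepB target) (none, bef, p0)
        = (none, bef ++ l.filter (fun x => x ≠ target), p0) := by
  intro l
  induction l with
  | nil => intro bef p0 _; simp
  | cons x rest ih =>
    intro bef p0 h
    rw [List.foldl_cons, List.filter_cons]
    by_cases hx : x = target
    · rw [show pvStepB target (none, bef, p0) x = (none, bef, p0) from by
        simp [pvStepB, hx]]
      simp only [ne_eq, hx, not_true_eq_false, decide_false, if_false]
      exact ih bef p0 (fun y hy => h y (by simp [hy]))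
    · rw [show pvStepB target (none, bef, p0) x = (none, bef ++ [x], p0) from by
        simp [pvStepB, hx, h x (by simp)]]
      simp only [ne_eq, hx, not_false_eq_true, decide_true, if_true]
      rw [ih (bef ++ [x]) p0 (fun y hy => h y (by simp [hy]))]
      simp

theorem pvFoldB_some (target : String) :
    ∀ (l : List String) (nxt : String) (bef post : List String),
      l.foldl (pvStepB target) (some nxt, bef, post)
        = (some nxt, bef, post ++ l.filter (fun x => x ≠ target)) := by
  intro l
  induction l with
  | nil => intro nxt bef post; simp
  | cons x rest ih =>
    intro nxt bef post
    rw [List.foldl_cons, List.filter_cons]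
    by_cases hx : x = target
    · rw [show pvStepB target (some nxt, bef, post) x = (some nxt, bef, post) from by
        simp [pvStepB, hx]]
      simp only [ne_eq, hx, not_true_eq_false, decide_false, if_false]
      exact ih nxt bef post
    · rw [show pvStepB target (some nxt, bef, post) x = (some nxt, bef, post ++ [x]) from by
        simp [pvStepB, hx]]
      simp only [ne_eq, hx, not_false_eq_true, decide_true, if_true]
      rw [ih nxt bef (post ++ [x])]
      simp

theorem pvFoldB_shift (target : String) :
    ∀ (l : List String) (o : Option String) (bef b p : List String),
      l.foldl (pvStepB target) (o, bef ++ b, p)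
        = ((l.foldl (pvStepB target) (o, b, p)).1,
           bef ++ (l.foldl (pvStepB target) (o, b, p)).2.1,
           (l.foldl (pvStepB target) (o, b, p)).2.2) := by
  intro l
  induction l with
  | nil => intro o bef b p; rfl
  | cons x rest ih =>
    intro o bef b p
    rcases hst : pvStepB target (o, b, p) x with ⟨o', b', p'⟩
    have hst2 : pvStepB target (o, bef ++ b, p) x = (o', bef ++ b', p') := by
      cases o <;> simp only [pvStepB] at hst ⊢ <;> split_ifs at hst ⊢ <;>
        simp_all [List.append_assoc]
    rw [List.foldl_cons, List.foldl_cons, hst, hst2, ih]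

theorem pvLoopB_acc (target : String) (names : List String) :
    ∀ (fuel : Nat) (cur : String) (bef aft : List String),
      pvLoopB target names fuel cur bef aft
        = (bef ++ (pvLoopB target names fuel cur [] []).1,
           (pvLoopB target names fuel cur [] []).2 ++ aft) := by
  intro fuel
  induction fuel with
  | zero => intro cur bef aft; simp [pvLoopB]
  | succ f ih =>
    intro cur bef aft
    rcases hF : (immediate_children_py cur names).foldl (pvStepB target) (none, [], [])
      with ⟨o, b, p⟩
    have hF2 : (immediate_children_py cur names).foldl (pvStepB target) (none, bef, [])
        = (o, bef ++ b, p) := by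
      have h2 := pvFoldB_shift target (immediate_children_py cur names) none bef [] []
      rw [List.append_nil] at h2
      rw [h2, hF]
    simp only [pvLoopB, hF, hF2]
    cases o with
    | none =>
      show (bef ++ b, p ++ aft) = (bef ++ b, (p ++ []) ++ aft)
      simp
    | some nxt =>
      show pvLoopB target names f nxt (bef ++ b) (p ++ aft)
          = (bef ++ (pvLoopB target names f nxt b (p ++ [])).1,
             (pvLoopB target names f nxt b (p ++ [])).2 ++ aft)
      rw [ih nxt (bef ++ b) (p ++ aft), ih nxt b (p ++ [])]
      simp [List.append_assoc]

-- ---- Set/list bookkeeping ----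

theorem pvUpdate_eq_ofList {s : List String} (l : List String) (h : s.Nodup) :
    PySem.Set.update s l = PySem.Set.ofList (s ++ l) := by
  rw [PySem.Set.ofList_append, PySem.Set.ofList_eq_self_of_nodup _ h]

theorem pvOfList_ofList_append (X R : List String) :
    PySem.Set.ofList (PySem.Set.ofList X ++ R) = PySem.Set.ofList (X ++ R) := by
  rw [PySem.Set.ofList_append, PySem.Set.ofList_append, PySem.Set.ofList_ofList]

-- ---- the main correspondence ----

theorem pvML (target : String) (names : List String)
    (hnd : names.Nodup)
    (hA : names.Pairwise (fun x y => pvDsw x y = false))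
    (hC : pvContigB names = true) :
    ∀ (fuel : Nat) (S : List String) (cur : String),
      S.Nodup →
      cur ∈ pvClean target S →
      pvDsw target cur = true →
      (∀ m ∈ pvClean target S, pvDsw target m = true →
        m = cur ∨ m.toList.length < cur.toList.length) →
      target.toList.length ≤ fuel + cur.toList.length →
      pvRemoveA target names fuel S
        = PySem.Set.ofList ((pvClean target S).filter (fun m => !(m == cur))
            ++ (pvLoopB target names fuel cur [] []).1
            ++ (pvLoopB target names fuel cur [] []).2) := by
  intro fuel
  induction fuel with
  | zero =>
    intro S cur _ _ hcur _ hfuel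
    exfalso
    have := pvDsw_length hcur
    omega
  | succ f ih =>
    intro S cur hS hmem hcur hmax hfuel
    have hclean_nodup : (pvClean target S).Nodup := pvClean_nodup hS
    have hanc : (PySem.List.sorted ((pvClean target S).filter (fun m => pvDsw target m))
        (fun m => PySem.Str.len m) false).getLast? = some cur := by
      apply pvSorted_getLast
      · rw [List.mem_filter]; exact ⟨hmem, hcur⟩
      · intro m hm
        rw [List.mem_filter] at hm
        exact hmax m hm.1 hm.2
    have hunfold : pvRemoveA target names (f + 1) S =
        (immediate_children_py cur names).foldl
          (fun fr child =>
            if child = target then fr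
            else if pvDsw target child then pvRemoveA target names f (PySem.Set.add fr child)
            else PySem.Set.add fr child)
          (PySem.Set.discard (pvClean target S) cur) := by
      show (match (PySem.List.sorted ((pvClean target S).filter (fun m => pvDsw target m))
              (fun m => PySem.Str.len m) false).getLast? with
            | none => pvClean target S
            | some ancestor =>
              (immediate_children_py ancestor names).foldl
                (fun fr child =>
                  if child = target then fr
                  else if pvDsw target child then pvRemoveA target names f (PySem.Set.add fr child)
                  else PySem.Set.add fr child)
                (PySem.Set.discard (pvClean target S) ancestor)) = _
      rw [hanc]
    have hdisc : PySem.Set.discard (pvClean target S) cur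
        = (pvClean target S).filter (fun m => !(m == cur)) := rfl
    have hfrozen3_nodup : ((pvClean target S).filter (fun m => !(m == cur))).Nodup :=
      hclean_nodup.filter _
    obtain ⟨hCnd, hCdsw, hCanti⟩ := pvChildren_spec cur names hnd hA hC
    rw [hunfold, hdisc]
    by_cases hex : ∃ c ∈ immediate_children_py cur names, c ≠ target ∧ pvDsw target c = true
    · obtain ⟨c, hcC, hct, hdc⟩ := hex
      obtain ⟨pre, post, hCeq⟩ := List.append_of_mem hcC
      have hcur_lt : cur.toList.length < c.toList.length := by
        have := pvDsw_length (hCdsw c hcC)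
        omega
      have htarget_notC : target ∉ immediate_children_py cur names := by
        intro ht
        have h0 := hCanti target ht c hcC (fun h0 => hct h0.symm)
        simp [h0] at hdc
      have huniq : ∀ x ∈ immediate_children_py cur names,
          x ≠ target → pvDsw target x = true → x = c := by
        intro x hx hxt hdx
        by_contra hne
        rcases Nat.le_total x.toList.length c.toList.length with hl | hl
        · rcases pvDsw_compare hdx hdc hl with h0 | h0
          · exact hne h0
          · have := hCanti c hcC x hx (fun h0 => hne h0.symm)
            simp [this] at h0
        · rcases pvDsw_compare hdc hdx hl with h0 | h0
          · exact hne h0.symm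
          · have := hCanti x hx c hcC hne
            simp [this] at h0
      have hnodesc : ∀ x ∈ immediate_children_py cur names, pvDsw x target = false := by
        intro x hx
        cases hdx : pvDsw x target
        · rfl
        · exfalso
          have hxc : pvDsw x c = true := pvDsw_trans hdx hdc
          have hxnec : x ≠ c := by
            intro h0
            rw [h0] at hdx
            exact pvDsw_antisymm hdx hdc
          have := hCanti x hx c hcC hxnec
          simp [this] at hxc
      have hCnd' := hCnd
      rw [hCeq] at hCnd'
      have hncp : (c :: post).Nodup := hCnd'.of_append_right
      have hdisj : pre.Disjoint (c :: post) := List.disjoint_of_nodup_append hCnd'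
      have hcpre : c ∉ pre := fun h0 => hdisj h0 (by simp)
      have hclean_pre : ∀ x ∈ pre, x ≠ target ∧ pvDsw target x = false := by
        intro x hx
        have hxC : x ∈ immediate_children_py cur names := by rw [hCeq]; simp [hx]
        have hxt : x ≠ target := fun h0 => htarget_notC (h0 ▸ hxC)
        refine ⟨hxt, ?_⟩
        cases hdx : pvDsw target x
        · rfl
        · exfalso
          exact hcpre ((huniq x hxC hxt hdx) ▸ hx)
      have hclean_post : ∀ x ∈ post, x ≠ target ∧ pvDsw target x = false := by
        intro x hx
        have hxC : x ∈ immediate_children_py cur names := by rw [hCeq]; simp [hx]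
        have hxt : x ≠ target := fun h0 => htarget_notC (h0 ▸ hxC)
        refine ⟨hxt, ?_⟩
        cases hdx : pvDsw target x
        · rfl
        · exfalso
          have h0 := huniq x hxC hxt hdx
          rw [h0] at hx
          exact (List.nodup_cons.1 hncp).1 hx
      rw [hCeq, List.foldl_append, List.foldl_cons]
      rw [pvFoldA_clean target names f pre _ (fun x hx => (hclean_pre x hx).2)]
      have hprefilter : pre.filter (fun x => x ≠ target) = pre :=
        List.filter_eq_self.2 (fun x hx => by simp [(hclean_pre x hx).1])
      rw [hprefilter]
      rw [if_neg hct, if_pos hdc]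
      have hfr1_nodup : (PySem.Set.update ((pvClean target S).filter (fun m => !(m == cur))) pre).Nodup :=
        PySem.Set.nodup_update _ pre hfrozen3_nodup
      have hcfr1 : c ∉ PySem.Set.update ((pvClean target S).filter (fun m => !(m == cur))) pre := by
        intro h0
        rcases (PySem.Set.mem_update _ _ _).1 h0 with h1 | h1
        · have h2 : c ∈ pvClean target S := (List.mem_filter.1 h1).1
          rcases hmax c h2 hdc with h3 | h3
          · rw [h3] at hcur_lt; omega
          · omega
        · exact hcpre h1
      rw [show PySem.Set.add (PySem.Set.update ((pvClean target S).filter (fun m => !(m == cur))) pre) c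
          = PySem.Set.update ((pvClean target S).filter (fun m => !(m == cur))) pre ++ [c] from
        PySem.Set.add_of_not_mem hcfr1]
      have hclean_fr1 : ∀ m ∈ PySem.Set.update ((pvClean target S).filter (fun m => !(m == cur))) pre,
          m ≠ target ∧ pvDsw m target = false := by
        intro m hm
        rcases (PySem.Set.mem_update _ _ _).1 hm with h1 | h1
        · have := pvClean_mem (List.mem_filter.1 h1).1
          exact ⟨this.2.1, this.2.2⟩
        · refine ⟨(hclean_pre m h1).1, ?_⟩
          have hxC : m ∈ immediate_children_py cur names := by rw [hCeq]; simp [h1]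
          exact hnodesc m hxC
      have hcleanS' : pvClean target (PySem.Set.update ((pvClean target S).filter (fun m => !(m == cur))) pre ++ [c])
          = PySem.Set.update ((pvClean target S).filter (fun m => !(m == cur))) pre ++ [c] := by
        apply pvClean_of_clean
        intro m hm
        rcases List.mem_append.1 hm with h1 | h1
        · exact hclean_fr1 m h1
        · rw [show m = c from by simpa using h1]
          exact ⟨hct, hnodesc c hcC⟩
      have hIH := ih (PySem.Set.update ((pvClean target S).filter (fun m => !(m == cur))) pre ++ [c]) c
        (hfr1_nodup.append (List.nodup_singleton c)
          (fun a ha hb => hcfr1 ((List.mem_singleton.1 hb) ▸ ha)))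
        (by rw [hcleanS']; simp)
        hdc
        (by
          intro m hm hdm
          rw [hcleanS'] at hm
          rcases List.mem_append.1 hm with h1 | h1
          · rcases (PySem.Set.mem_update _ _ _).1 h1 with h2 | h2
            · right
              have h3 : m ∈ pvClean target S := (List.mem_filter.1 h2).1
              rcases hmax m h3 hdm with h4 | h4
              · exfalso
                have := (List.mem_filter.1 h2).2
                rw [h4] at this
                simp at this
              · omega
            · exfalso
              have := (hclean_pre m h2).2
              simp [this] at hdm
          · left
            simpa using h1)
        (by omega)
      rw [hcleanS'] at hIH
      have hfilterc : (PySem.Set.update ((pvClean target S).filter (fun m => !(m == cur))) pre ++ [c]).filter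
          (fun m => !(m == c)) = PySem.Set.update ((pvClean target S).filter (fun m => !(m == cur))) pre := by
        rw [List.filter_append]
        have hx1 : (PySem.Set.update ((pvClean target S).filter (fun m => !(m == cur))) pre).filter
            (fun m => !(m == c)) = PySem.Set.update ((pvClean target S).filter (fun m => !(m == cur))) pre :=
          List.filter_eq_self.2 (fun x hx => by
            have : x ≠ c := fun h0 => hcfr1 (h0 ▸ hx)
            simp [this])
        have hx2 : ([c].filter (fun m => !(m == c))) = ([] : List String) := by simp
        rw [hx1, hx2, List.append_nil]
      rw [hfilterc] at hIH
      rw [hIH]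
      rw [pvFoldA_clean target names f post _ (fun x hx => (hclean_post x hx).2)]
      rw [show post.filter (fun x => x ≠ target) = post from
        List.filter_eq_self.2 (fun x hx => by simp [(hclean_post x hx).1])]
      rw [pvUpdate_eq_ofList post (PySem.Set.nodup_ofList _)]
      rw [pvUpdate_eq_ofList pre hfrozen3_nodup]
      -- B side
      have hloop : pvLoopB target names (f + 1) cur [] []
          = (pre ++ (pvLoopB target names f c [] []).1,
             (pvLoopB target names f c [] []).2 ++ post) := by
        have hfold : (immediate_children_py cur names).foldl (pvStepB target) (none, [], [])
            = (some c, pre, post) := by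
          rw [hCeq, List.foldl_append, List.foldl_cons]
          rw [pvFoldB_none target pre [] [] (fun x hx => (hclean_pre x hx).2)]
          rw [hprefilter, List.nil_append]
          rw [show pvStepB target (none, pre, []) c = (some c, pre, []) from by
            simp [pvStepB, hct, hdc]]
          rw [pvFoldB_some target post c pre []]
          rw [show post.filter (fun x => x ≠ target) = post from
            List.filter_eq_self.2 (fun x hx => by simp [(hclean_post x hx).1])]
          rw [List.nil_append]
        show (match (immediate_children_py cur names).foldl (pvStepB target) (none, [], []) with
              | (none, bef, post) => (bef, post ++ [])
              | (some nxt, bef, post) => pvLoopB target names f nxt bef (post ++ [])) = _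
        rw [hfold]
        show pvLoopB target names f c pre (post ++ []) = _
        rw [List.append_nil, pvLoopB_acc target names f c pre post]
      rw [hloop]
      rw [pvOfList_ofList_append]
      rw [show PySem.Set.ofList ((pvClean target S).filter (fun m => !(m == cur)) ++ pre)
            ++ (pvLoopB target names f c [] []).1 ++ (pvLoopB target names f c [] []).2 ++ post
          = PySem.Set.ofList ((pvClean target S).filter (fun m => !(m == cur)) ++ pre)
            ++ ((pvLoopB target names f c [] []).1
              ++ ((pvLoopB target names f c [] []).2 ++ post)) from by
        simp [List.append_assoc]]
      rw [pvOfList_ofList_append]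
      congr 1
      simp [List.append_assoc]
    · have hallC : ∀ x ∈ immediate_children_py cur names, pvDsw target x = false := by
        intro x hx
        by_cases hxt : x = target
        · rw [hxt]; exact pvDsw_irrefl target
        · cases hdx : pvDsw target x
          · rfl
          · exact absurd ⟨x, hx, hxt, hdx⟩ hex
      rw [pvFoldA_clean target names f _ _ hallC]
      have hloop : pvLoopB target names (f + 1) cur [] []
          = ((immediate_children_py cur names).filter (fun x => x ≠ target), []) := by
        have hfold := pvFoldB_none target (immediate_children_py cur names) [] [] hallC
        rw [List.nil_append] at hfold
        show (match (immediate_children_py cur names).foldl (pvStepB target) (none, [], []) with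
              | (none, bef, post) => (bef, post ++ [])
              | (some nxt, bef, post) => pvLoopB target names f nxt bef (post ++ [])) = _
        rw [hfold]
        rfl
      rw [hloop]
      rw [pvUpdate_eq_ofList _ hfrozen3_nodup]
      congr 1
      simp

theorem pvAncStep_ne_none {target : String} {acc : Option String} (m : String)
    (h : acc ≠ none) : pvAncStep target acc m ≠ none := by
  cases acc with
  | none => exact absurd rfl h
  | some a =>
    rw [pvAncStep_some]
    split_ifs <;> simp

theorem pvFindAnc_isSome {target : String} {base : List String} {m : String}
    (hm : m ∈ base) (hd : pvDsw target m = true) : pvFindAnc target base ≠ none := by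
  unfold pvFindAnc
  suffices H : ∀ (l : List String) (acc : Option String),
      (m ∈ l ∨ acc ≠ none) → l.foldl (pvAncStep target) acc ≠ none by
    exact H base none (Or.inl hm)
  intro l
  induction l with
  | nil =>
    intro acc h
    rcases h with h | h
    · simp at h
    · exact h
  | cons x rest ih =>
    intro acc h
    rw [List.foldl_cons]
    rcases h with h | h
    · rcases List.mem_cons.1 h with h0 | h0
      · apply ih
        right
        subst h0
        cases acc with
        | none =>
          rw [pvAncStep_none, if_pos hd]
          simp
        | some a => exact pvAncStep_ne_none m (by simp)
      · exact ih _ (Or.inl h0)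
    · exact ih _ (Or.inr (pvAncStep_ne_none x h))

theorem pvExists_max (l : List String) (hne : l ≠ []) :
    ∃ a ∈ l, ∀ b ∈ l, b.toList.length ≤ a.toList.length := by
  induction l with
  | nil => exact absurd rfl hne
  | cons x rest ih =>
    rcases eq_or_ne rest [] with h0 | h0
    · subst h0
      exact ⟨x, by simp, by simp⟩
    · obtain ⟨a, ha, hamax⟩ := ih h0
      rcases Nat.le_total x.toList.length a.toList.length with h1 | h1
      · refine ⟨a, by simp [ha], ?_⟩
        intro b hb
        rcases List.mem_cons.1 hb with h2 | h2
        · subst h2; exact h1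
        · exact hamax b h2
      · refine ⟨x, by simp, ?_⟩
        intro b hb
        rcases List.mem_cons.1 hb with h2 | h2
        · subst h2; exact le_refl _
        · exact le_trans (hamax b h2) h1

-- ===== VERDICT (by name: the statement is the Claim_ definition above) =====
theorem remove_target_from_frozen_py_spec : Claim_equal_remove_target_from_frozen_py := by
  intro frozen target layer_names _hdom hpre
  obtain ⟨hnd, hpair, hcontig⟩ := hpre
  have hA : layer_names.Pairwise (fun x y => pvDsw x y = false) := by
    have h0 := (pvPairB_iff _ _).1 hpair
    exact h0.imp (fun h => by simpa using h)
  show remove_target_from_frozen_py frozen target layer_names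
      = remove_target_from_frozen_py_alt frozen target layer_names
  have hS0nd : (PySem.Set.ofList frozen).Nodup := PySem.Set.nodup_ofList frozen
  have hcln : (pvClean target (PySem.Set.ofList frozen)).Nodup := pvClean_nodup hS0nd
  have halt : remove_target_from_frozen_py_alt frozen target layer_names =
      (match pvFindAnc target (pvClean target (PySem.Set.ofList frozen)) with
       | none => PySem.Set.ofList (pvClean target (PySem.Set.ofList frozen))
       | some anc => PySem.Set.ofList ((pvClean target (PySem.Set.ofList frozen)).erase anc
           ++ (pvLoopB target layer_names (target.toList.length + 1) anc [] []).1
           ++ (pvLoopB target layer_names (target.toList.length + 1) anc [] []).2)) := by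
    show (match pvFindAnc target ((PySem.Set.ofList frozen).filter
            (fun m => !(m == target) && !(pvDsw m target))) with
          | none => PySem.Set.ofList ((PySem.Set.ofList frozen).filter
              (fun m => !(m == target) && !(pvDsw m target)))
          | some anc => PySem.Set.ofList (((PySem.Set.ofList frozen).filter
              (fun m => !(m == target) && !(pvDsw m target))).erase anc
              ++ (pvLoopB target layer_names (target.toList.length + 1) anc [] []).1
              ++ (pvLoopB target layer_names (target.toList.length + 1) anc [] []).2)) = _
    rw [← pvClean_eq]
  rw [halt]
  rcases hfa : pvFindAnc target (pvClean target (PySem.Set.ofList frozen)) with _ | cur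
  · -- no covering ancestor
    have hnone : ∀ m ∈ pvClean target (PySem.Set.ofList frozen), pvDsw target m = false := by
      intro m hm
      cases hd : pvDsw target m
      · rfl
      · exact absurd hfa (pvFindAnc_isSome hm hd)
    have ha0 : (pvClean target (PySem.Set.ofList frozen)).filter (fun m => pvDsw target m) = [] := by
      rw [List.filter_eq_nil_iff]
      intro a ha
      simp [hnone a ha]
    have hAeq : pvRemoveA target layer_names (target.toList.length + 1) (PySem.Set.ofList frozen)
        = pvClean target (PySem.Set.ofList frozen) := by
      show (match (PySem.List.sorted ((pvClean target (PySem.Set.ofList frozen)).filter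
              (fun m => pvDsw target m)) (fun m => PySem.Str.len m) false).getLast? with
            | none => pvClean target (PySem.Set.ofList frozen)
            | some ancestor =>
              (immediate_children_py ancestor layer_names).foldl
                (fun fr child =>
                  if child = target then fr
                  else if pvDsw target child then
                    pvRemoveA target layer_names target.toList.length (PySem.Set.add fr child)
                  else PySem.Set.add fr child)
                (PySem.Set.discard (pvClean target (PySem.Set.ofList frozen)) ancestor)) = _
      rw [ha0, show PySem.List.sorted ([] : List String) (fun m => PySem.Str.len m) false = []
        from (PySem.List.sorted_eq_nil_iff _ _ _).2 rfl]
      rfl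
    show pvRemoveA target layer_names (target.toList.length + 1) (PySem.Set.ofList frozen) = _
    rw [hAeq, PySem.Set.ofList_eq_self_of_nodup _ hcln]
  · -- some ancestor: identify it as the deepest one
    have hne : (pvClean target (PySem.Set.ofList frozen)).filter (fun m => pvDsw target m) ≠ [] := by
      intro h0
      have : pvFindAnc target (pvClean target (PySem.Set.ofList frozen)) = none := by
        apply pvFindAnc_none
        intro m hm
        cases hd : pvDsw target m
        · rfl
        · exfalso
          have : m ∈ (pvClean target (PySem.Set.ofList frozen)).filter (fun m => pvDsw target m) :=
            List.mem_filter.2 ⟨hm, hd⟩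
          rw [h0] at this
          simp at this
      rw [this] at hfa
      cases hfa
    obtain ⟨cmax, hcmem, hcmax⟩ := pvExists_max _ hne
    have hcmem' : cmax ∈ pvClean target (PySem.Set.ofList frozen) := (List.mem_filter.1 hcmem).1
    have hcd : pvDsw target cmax = true := (List.mem_filter.1 hcmem).2
    have hmax : ∀ m ∈ pvClean target (PySem.Set.ofList frozen), pvDsw target m = true →
        m = cmax ∨ m.toList.length < cmax.toList.length := by
      intro m hm hd
      have hle := hcmax m (List.mem_filter.2 ⟨hm, hd⟩)
      rcases lt_or_eq_of_le hle with h1 | h1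
      · right; exact h1
      · left; exact pvAnc_unique hd hcd h1
    have heq : cur = cmax := by
      have h2 : (some cur : Option String) = some cmax := by
        rw [← hfa]
        exact pvFindAnc_some hcln hcmem' hcd hmax
      exact Option.some_injective _ h2
    subst heq
    have hml := pvML target layer_names hnd hA hcontig (target.toList.length + 1)
      (PySem.Set.ofList frozen) cur hS0nd hcmem' hcd hmax (by omega)
    show pvRemoveA target layer_names (target.toList.length + 1) (PySem.Set.ofList frozen) = _
    rw [hml]
    have herase : (pvClean target (PySem.Set.ofList frozen)).erase cur
        = (pvClean target (PySem.Set.ofList frozen)).filter (fun m => !(m == cur)) := by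
      rw [List.Nodup.erase_eq_filter hcln]
      rfl
    show PySem.Set.ofList ((pvClean target (PySem.Set.ofList frozen)).filter (fun m => !(m == cur))
        ++ (pvLoopB target layer_names (target.toList.length + 1) cur [] []).1
        ++ (pvLoopB target layer_names (target.toList.length + 1) cur [] []).2)
      = PySem.Set.ofList ((pvClean target (PySem.Set.ofList frozen)).erase cur
        ++ (pvLoopB target layer_names (target.toList.length + 1) cur [] []).1
        ++ (pvLoopB target layer_names (target.toList.length + 1) cur [] []).2)
    rw [herase]
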